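-- pv_equiv track=rewrite | github.com/crocs-muni/scrutiny-viz | report_html.py | pair_group_changes
-- ===== SOURCE A (Python) =====
-- from typing import Any, Dict, Iterable, List, Optional, Tuple
--
-- def pair_group_changes(removed: List[Dict[str, Any]], added: List[Dict[str, Any]]):
--     out = []
--     r = removed[:]
--     a = added[:]
--     while r and a:
--         out.append(("arrow", r.pop(0), a.pop(0)))
--     for x in r:
--         out.append(("removed", x, None))
--     for y in a:
--         out.append(("added", None, y))
--     return out
-- ===== SOURCE B (Python) =====
-- from typing import Any, Dict, List
--
-- def pair_group_changes(removed: List[Dict[str, Any]], added: List[Dict[str, Any]]):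
--     n, m = len(removed), len(added)
--     return [("arrow", removed[i], added[i]) if i < n and i < m
--             else ("removed", removed[i], None) if i < n
--             else ("added", None, added[i])
--             for i in range(max(n, m))]
-- ===== Notes on version B (the rewrite author's own statement) =====
-- stated objective: simpler
-- what changed: Replaces A's destructive while-pop loop over two list copies plus two sequential tail loops by a single indexed classification pass over range(max(n,m)) with no list copies.
import Mathlib
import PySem

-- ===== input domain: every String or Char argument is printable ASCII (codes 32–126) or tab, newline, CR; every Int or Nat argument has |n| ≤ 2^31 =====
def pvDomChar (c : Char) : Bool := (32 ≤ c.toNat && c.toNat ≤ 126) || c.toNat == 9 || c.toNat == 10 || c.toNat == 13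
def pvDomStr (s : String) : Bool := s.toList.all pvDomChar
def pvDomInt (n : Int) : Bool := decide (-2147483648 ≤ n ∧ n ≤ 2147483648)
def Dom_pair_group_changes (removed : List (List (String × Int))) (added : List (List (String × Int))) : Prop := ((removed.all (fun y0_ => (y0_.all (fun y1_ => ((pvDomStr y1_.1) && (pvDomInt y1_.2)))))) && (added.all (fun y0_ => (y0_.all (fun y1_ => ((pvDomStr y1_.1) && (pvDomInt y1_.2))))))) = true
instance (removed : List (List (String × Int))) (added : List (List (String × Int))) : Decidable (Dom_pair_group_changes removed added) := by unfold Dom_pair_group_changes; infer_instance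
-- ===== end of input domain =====

-- B replaces A's destructive while-pop loop plus two tail loops by one indexed
-- classification pass over range(max n m); objective: simpler (A also copies its
-- arguments but never exposes the copies, so return-value equivalence is the whole story).


-- ===== PORT A =====
-- the while loop: pop the heads of both copies while both are nonempty, then the
-- two for-loops over the remaining tails (out accumulation becomes list construction)
def pgWhile (r a : List (List (String × Int))) :
    List (String × (Option (List (String × Int))) × (Option (List (String × Int)))) :=
  match r, a with
  | x :: r', y :: a' => ("arrow", some x, some y) :: pgWhile r' a'
  | r, a =>
      r.map (fun x => ("removed", some x, none)) ++ a.map (fun y => ("added", none, some y))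

def pair_group_changes (removed : List (List (String × Int))) (added : List (List (String × Int))) : List (String × (Option (List (String × Int))) × (Option (List (String × Int)))) :=
  pgWhile removed added

-- ===== PORT B =====
-- single indexed pass; removed[i]?/added[i]? is exact for Python's removed[i]/added[i]
-- here since the branch guards guarantee the index is in range (and the slot is Option-typed)
def pair_group_changes_alt (removed : List (List (String × Int))) (added : List (List (String × Int))) : List (String × (Option (List (String × Int))) × (Option (List (String × Int)))) :=
  let n := removed.length
  let m := added.length
  (List.range (max n m)).map (fun i =>
    if i < n ∧ i < m then ("arrow", removed[i]?, added[i]?)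
    else if i < n then ("removed", removed[i]?, none)
    else ("added", none, added[i]?))

-- ===== PRECONDITION & SPEC =====
def Spec_pair_group_changes (removed : List (List (String × Int))) (added : List (List (String × Int))) (out : List (String × (Option (List (String × Int))) × (Option (List (String × Int))))) : Prop := out = pair_group_changes_alt removed added
instance (removed : List (List (String × Int))) (added : List (List (String × Int))) (out : List (String × (Option (List (String × Int))) × (Option (List (String × Int))))) : Decidable (Spec_pair_group_changes removed added out) := by unfold Spec_pair_group_changes; infer_instance

-- ===== CLAIM (what is proved, stated in full; the proofs are below) =====
def Claim_equal_pair_group_changes : Prop := ∀ (removed : List (List (String × Int))) (added : List (List (String × Int))), Dom_pair_group_changes removed added → Spec_pair_group_changes removed added (pair_group_changes removed added)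

-- ===== LEMMAS AND PROOFS =====

-- an index-only pass over one list is that list's map
theorem range_map_get {α β : Type} (f : Option α → β) (xs : List α) :
    (List.range xs.length).map (fun i => f xs[i]?) = xs.map (fun x => f (some x)) := by
  induction xs with
  | nil => simp
  | cons x xs ih =>
      simp only [List.length_cons, List.range_succ_eq_map, List.map_cons, List.map_map]
      exact congrArg _ (by simpa [Function.comp] using ih)

theorem alt_eq_while (removed added : List (List (String × Int))) :
    pair_group_changes_alt removed added = pgWhile removed added := by
  induction removed generalizing added with
  | nil =>
      cases added with
      | nil => simp [pair_group_changes_alt, pgWhile]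
      | cons y a =>
          simp only [pgWhile, pair_group_changes_alt, List.length_nil, List.map_nil,
            List.nil_append, Nat.max_eq_right (Nat.zero_le _)]
          refine Eq.trans (List.map_congr_left ?_)
            (range_map_get
              (fun o => (("added" : String), (none : Option (List (String × Int))), o)) (y :: a))
          intro i _; simp
  | cons x r ih =>
      cases added with
      | nil =>
          simp only [pgWhile, pair_group_changes_alt, List.length_nil, List.map_nil,
            List.append_nil, Nat.max_eq_left (Nat.zero_le _)]
          refine Eq.trans (List.map_congr_left ?_)
            (range_map_get
              (fun o => (("removed" : String), o, (none : Option (List (String × Int))))) (x :: r))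
          intro i hi; simp at hi; simp [hi]
      | cons y a =>
          have h : max (x :: r).length (y :: a).length = max r.length a.length + 1 := by
            simp [Nat.succ_max_succ]
          simp only [pair_group_changes_alt, h, List.range_succ_eq_map, List.map_cons,
            List.map_map, pgWhile]
          refine List.cons_eq_cons.mpr ⟨by simp, ?_⟩
          calc List.map _ (List.range (max r.length a.length))
              = pair_group_changes_alt r a := by
                simp only [pair_group_changes_alt]
                exact List.map_congr_left (fun i hi => by simp [Function.comp])
            _ = pgWhile r a := ih a

-- ===== VERDICT (by name: the statement is the Claim_ definition above) =====
theorem pair_group_changes_spec : Claim_equal_pair_group_changes := by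
  intro removed added _
  unfold Spec_pair_group_changes pair_group_changes
  exact (alt_eq_while removed added).symm
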